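-- pv_equiv track=rewrite | github.com/youngminss/Codingtest | elice-algorithm/추억 여행.py | solution
-- ===== SOURCE A (Python) =====
-- def solution(p,w,words):
--     words = words.upper()
--     length = len(words)
--     keyboard = {
--         ' ' : [1,p],
--         'A' : [2,p],'B' : [2,p*2], 'C' : [2,p*3],
--         'D' : [3,p], 'E' : [3,p*2], 'F' : [3,p*3],
--         'G' : [4,p], 'H' : [4,p*2], 'I' : [4,p*3],
--         'J' : [5,p], 'K' : [5,p*2], 'L' : [5,p*3],
--         'M' : [6,p], 'N' : [6,p*2], 'O' : [6,p*3],
--         'P' : [7,p], 'Q' : [7,p*2], 'R' : [7,p*3], 'S' : [7,p*4],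
--         'T' : [8,p], 'U' : [8,p*2], 'V' : [8,p*3],
--         'W' : [9,p], 'X' : [9,p*2], 'Y' : [9,p*3], 'Z' : [9,p*4]
--     }
--
--     second = keyboard[words[0]][1]
--     for i in range(1,length):
--         if keyboard[words[i]][0] == keyboard[words[i-1]][0] :
--             if keyboard[words[i]][0] == ' ':
--                 second += keyboard[words[i]][1]
--             else:
--                 second += w
--                 second += keyboard[words[i]][1]
--         else:
--             second += keyboard[words[i]][1]
--
--     return second
-- ===== SOURCE B (Python) =====
-- KEYBOARD_ROWS = {
--     ' ': 1,
--     'A': 2, 'B': 2, 'C': 2,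
--     'D': 3, 'E': 3, 'F': 3,
--     'G': 4, 'H': 4, 'I': 4,
--     'J': 5, 'K': 5, 'L': 5,
--     'M': 6, 'N': 6, 'O': 6,
--     'P': 7, 'Q': 7, 'R': 7, 'S': 7,
--     'T': 8, 'U': 8, 'V': 8,
--     'W': 9, 'X': 9, 'Y': 9, 'Z': 9,
-- }
-- KEYBOARD_COST = {
--     ' ': 1,
--     'A': 1, 'B': 2, 'C': 3,
--     'D': 1, 'E': 2, 'F': 3,
--     'G': 1, 'H': 2, 'I': 3,
--     'J': 1, 'K': 2, 'L': 3,
--     'M': 1, 'N': 2, 'O': 3,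
--     'P': 1, 'Q': 2, 'R': 3, 'S': 4,
--     'T': 1, 'U': 2, 'V': 3,
--     'W': 1, 'X': 2, 'Y': 3, 'Z': 4,
-- }
--
-- def solution(p, w, words):
--     words = words.upper()
--     total = sum(p * KEYBOARD_COST[c] for c in words)
--     same_key_pairs = sum(1 for a, b in zip(words, words[1:])
--                          if KEYBOARD_ROWS[a] == KEYBOARD_ROWS[b])
--     return total + w * same_key_pairs
-- ===== Notes on version B (the rewrite author's own statement) =====
-- stated objective: alternative
-- what changed: Replaces A's single branching index loop (whose space-branch compares an int to ' ' and is dead) by two independent aggregates over static tables: the sum of per-character press costs p*k plus w times the count of adjacent same-key pairs over zip(words, words[1:]).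
import Mathlib
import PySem

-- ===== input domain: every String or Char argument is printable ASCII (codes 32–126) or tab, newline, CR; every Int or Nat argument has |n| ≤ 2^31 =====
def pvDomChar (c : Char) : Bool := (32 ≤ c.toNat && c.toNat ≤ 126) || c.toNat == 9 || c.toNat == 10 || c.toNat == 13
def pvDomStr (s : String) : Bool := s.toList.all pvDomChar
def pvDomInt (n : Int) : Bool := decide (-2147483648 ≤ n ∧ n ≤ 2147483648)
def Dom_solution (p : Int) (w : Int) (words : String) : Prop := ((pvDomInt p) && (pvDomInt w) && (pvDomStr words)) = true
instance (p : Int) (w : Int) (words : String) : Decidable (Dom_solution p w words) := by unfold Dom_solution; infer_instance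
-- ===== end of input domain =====

-- B replaces A's single branching index loop by two independent aggregates
-- (total per-character cost + w * count of adjacent same-key pairs); same cost, different decomposition.
-- On empty input A raises IndexError (excluded by Pre_solution); B itself would return 0 there.

-- ===== PORT A =====
-- A's dict values are two-element lists [row, cost]; ported as pairs (row, cost).
def kbA (p : Int) : PySem.Dict Char (Int × Int) :=
  PySem.Dict.ofList [
    (' ', (1, p)),
    ('A', (2, p)), ('B', (2, p*2)), ('C', (2, p*3)),
    ('D', (3, p)), ('E', (3, p*2)), ('F', (3, p*3)),
    ('G', (4, p)), ('H', (4, p*2)), ('I', (4, p*3)),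
    ('J', (5, p)), ('K', (5, p*2)), ('L', (5, p*3)),
    ('M', (6, p)), ('N', (6, p*2)), ('O', (6, p*3)),
    ('P', (7, p)), ('Q', (7, p*2)), ('R', (7, p*3)), ('S', (7, p*4)),
    ('T', (8, p)), ('U', (8, p*2)), ('V', (8, p*3)),
    ('W', (9, p)), ('X', (9, p*2)), ('Y', (9, p*3)), ('Z', (9, p*4))]

-- dict lookups keyboard[...] are total here via getD; Pre_solution guarantees every
-- looked-up key is present, and words[0] is in range (Python raises outside Pre_).
def solution (p : Int) (w : Int) (words : String) : Int :=
  let cs := (PySem.Str.upper words).toList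
  let length : Int := cs.length
  let kb := kbA p
  let second := (kb.getD (PySem.List.pyGetD cs 0 ' ') (0, 0)).2
  (PySem.List.pyRange 1 length 1).foldl (fun second i =>
    let ci := PySem.List.pyGetD cs i ' '
    let cp := PySem.List.pyGetD cs (i - 1) ' '
    if (kb.getD ci (0, 0)).1 == (kb.getD cp (0, 0)).1 then
      -- Python: `if keyboard[words[i]][0] == ' '` compares an int with a str — always False
      if (false : Bool) then second + (kb.getD ci (0, 0)).2
      else second + w + (kb.getD ci (0, 0)).2
    else second + (kb.getD ci (0, 0)).2) second

-- ===== PORT B =====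
def kbRows : PySem.Dict Char Int :=
  PySem.Dict.ofList [
    (' ', 1),
    ('A', 2), ('B', 2), ('C', 2),
    ('D', 3), ('E', 3), ('F', 3),
    ('G', 4), ('H', 4), ('I', 4),
    ('J', 5), ('K', 5), ('L', 5),
    ('M', 6), ('N', 6), ('O', 6),
    ('P', 7), ('Q', 7), ('R', 7), ('S', 7),
    ('T', 8), ('U', 8), ('V', 8),
    ('W', 9), ('X', 9), ('Y', 9), ('Z', 9)]

def kbCost : PySem.Dict Char Int :=
  PySem.Dict.ofList [
    (' ', 1),
    ('A', 1), ('B', 2), ('C', 3),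
    ('D', 1), ('E', 2), ('F', 3),
    ('G', 1), ('H', 2), ('I', 3),
    ('J', 1), ('K', 2), ('L', 3),
    ('M', 1), ('N', 2), ('O', 3),
    ('P', 1), ('Q', 2), ('R', 3), ('S', 4),
    ('T', 1), ('U', 2), ('V', 3),
    ('W', 1), ('X', 2), ('Y', 3), ('Z', 4)]

def solution_alt (p : Int) (w : Int) (words : String) : Int :=
  let cs := (PySem.Str.upper words).toList
  let total := (cs.map (fun c => p * kbCost.getD c 0)).sum
  let sameKeyPairs : Int :=
    ((cs.zip (PySem.List.slice cs (some 1) none)).map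
      (fun ab => if kbRows.getD ab.1 0 == kbRows.getD ab.2 0 then (1 : Int) else 0)).sum
  total + w * sameKeyPairs

-- ===== PRECONDITION & SPEC =====
-- Pre_ excludes exactly the inputs where A raises: the empty string (IndexError at words[0])
-- and strings containing a character that, uppercased, is not a keyboard key (KeyError),
-- i.e. anything other than a space or an ASCII letter.
def Pre_solution (p : Int) (w : Int) (words : String) : Prop :=
  words.toList ≠ [] ∧
    words.toList.all (fun c => c == ' ' || ('A' ≤ c && c ≤ 'Z') || ('a' ≤ c && c ≤ 'z')) = true
instance (p : Int) (w : Int) (words : String) : Decidable (Pre_solution p w words) := by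
  unfold Pre_solution; infer_instance

def pvWitness_solution : Int × Int × String := (3, 2, "Hello World")

def Spec_solution (p : Int) (w : Int) (words : String) (out : Int) : Prop := out = solution_alt p w words
instance (p : Int) (w : Int) (words : String) (out : Int) : Decidable (Spec_solution p w words out) := by unfold Spec_solution; infer_instance

-- ===== CLAIM (what is proved, stated in full; the proofs are below) =====
def Claim_equal_solution : Prop := ∀ (p : Int) (w : Int) (words : String), Dom_solution p w words → Pre_solution p w words → Spec_solution p w words (solution p w words)


-- ===== LEMMAS AND PROOFS =====

-- trailing cost of typing t after having just typed prev (the closed form both loops reach)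
def tcost (p w : Int) : Char → List Char → Int
  | _, [] => 0
  | prev, c :: t =>
      (if (kbRows.getD c 0) = (kbRows.getD prev 0) then w + p * kbCost.getD c 0
       else p * kbCost.getD c 0) + tcost p w c t

-- B's two tables agree with A's packed dict, componentwise
theorem kbA_fst (p : Int) (c : Char) : ((kbA p).getD c (0, 0)).1 = kbRows.getD c 0 := by
  simp only [kbA, kbRows, PySem.Dict.ofList, PySem.Dict.update, List.foldl_cons, List.foldl_nil,
    PySem.Dict.getD_insert, PySem.Dict.getD_empty, apply_ite (Prod.fst : Int × Int → Int)]

theorem kbA_snd (p : Int) (c : Char) : ((kbA p).getD c (0, 0)).2 = p * kbCost.getD c 0 := by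
  simp only [kbA, kbCost, PySem.Dict.ofList, PySem.Dict.update, List.foldl_cons, List.foldl_nil,
    PySem.Dict.getD_insert, PySem.Dict.getD_empty, apply_ite (Prod.snd : Int × Int → Int),
    mul_ite, mul_one, mul_zero]

theorem pyGetD_cons_succ (x : Char) (l : List Char) (i : Int) (d : Char) (h : 0 ≤ i) :
    PySem.List.pyGetD (x :: l) (i + 1) d = PySem.List.pyGetD l i d := by
  obtain ⟨n, rfl⟩ := Int.eq_ofNat_of_zero_le h
  have e : ((n : Int) + 1) = ((n + 1 : ℕ) : Int) := by push_cast; ring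
  rw [e, PySem.List.pyGetD_natCast, PySem.List.pyGetD_natCast]
  simp [List.getD]

theorem shift_fold (m : ℕ) (f : Int → Int → Int) (acc : Int) :
    (PySem.List.pyRange 1 ((m : Int) + 1) 1).foldl f acc
    = (PySem.List.pyRange 0 (m : Int) 1).foldl (fun a k => f a (k + 1)) acc := by
  rw [PySem.List.pyRange_one, PySem.List.pyRange_one]
  have e1 : ((m : Int) + 1 - 1).toNat = m := by omega
  have e2 : ((m : Int) - 0).toNat = m := by omega
  rw [e1, e2, List.foldl_map, List.foldl_map]
  refine PySem.List.foldl_congr_mem _ _ _ _ ?_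
  intro a k _
  norm_num [add_comm]

-- A's index loop over prev :: t, re-based at index 0, equals acc + tcost prev t
theorem A_loop (p w : Int) (t : List Char) (prev : Char) (acc : Int) :
    (PySem.List.pyRange 0 (t.length : Int) 1).foldl (fun second j =>
      if kbRows.getD (PySem.List.pyGetD (prev :: t) (j + 1) ' ') 0
          == kbRows.getD (PySem.List.pyGetD (prev :: t) j ' ') 0 then
        second + w + p * kbCost.getD (PySem.List.pyGetD (prev :: t) (j + 1) ' ') 0
      else second + p * kbCost.getD (PySem.List.pyGetD (prev :: t) (j + 1) ' ') 0) acc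
    = acc + tcost p w prev t := by
  induction t generalizing prev acc with
  | nil => simp [tcost, PySem.List.pyRange_one_eq_nil]
  | cons c t ih =>
      have hlen : ((c :: t).length : Int) = (t.length : Int) + 1 := by simp
      rw [hlen, PySem.List.pyRange_one_cons (by omega)]
      rw [List.foldl_cons]
      simp only [zero_add]
      rw [shift_fold t.length]
      have hcg : ∀ (a : Int), ∀ k ∈ PySem.List.pyRange 0 (t.length : Int) 1,
          (if kbRows.getD (PySem.List.pyGetD (prev :: c :: t) (k + 1 + 1) ' ') 0
              == kbRows.getD (PySem.List.pyGetD (prev :: c :: t) (k + 1) ' ') 0 then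
            a + w + p * kbCost.getD (PySem.List.pyGetD (prev :: c :: t) (k + 1 + 1) ' ') 0
          else a + p * kbCost.getD (PySem.List.pyGetD (prev :: c :: t) (k + 1 + 1) ' ') 0)
          = (if kbRows.getD (PySem.List.pyGetD (c :: t) (k + 1) ' ') 0
              == kbRows.getD (PySem.List.pyGetD (c :: t) k ' ') 0 then
            a + w + p * kbCost.getD (PySem.List.pyGetD (c :: t) (k + 1) ' ') 0
          else a + p * kbCost.getD (PySem.List.pyGetD (c :: t) (k + 1) ' ') 0) := by
        intro a k hk
        have hk0 : 0 ≤ k := (PySem.List.mem_pyRange_one.mp hk).1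
        rw [pyGetD_cons_succ prev (c :: t) (k + 1) ' ' (by omega),
            pyGetD_cons_succ prev (c :: t) k ' ' hk0]
      rw [PySem.List.foldl_congr_mem _ _ _ _ hcg, ih c]
      have g0 : PySem.List.pyGetD (prev :: c :: t) 1 ' ' = c := by
        rw [show (1 : Int) = 0 + 1 from rfl, pyGetD_cons_succ prev (c :: t) 0 ' ' le_rfl,
            PySem.List.pyGetD_zero_cons]
      simp only [tcost, g0, PySem.List.pyGetD_zero_cons, beq_iff_eq]
      split_ifs <;> ring

-- B's two aggregates over prev :: t equal the same closed form
theorem B_sum (p w : Int) (t : List Char) (prev : Char) :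
    ((t.map (fun c => p * kbCost.getD c 0)).sum
      + w * (((prev :: t).zip t).map
          (fun ab => if kbRows.getD ab.1 0 == kbRows.getD ab.2 0 then (1 : Int) else 0)).sum)
    = tcost p w prev t := by
  induction t generalizing prev with
  | nil => simp [tcost]
  | cons c t ih =>
      rw [show (prev :: c :: t).zip (c :: t) = (prev, c) :: ((c :: t).zip t) from rfl]
      simp only [List.map_cons, List.sum_cons, tcost, ← ih c, beq_iff_eq]
      by_cases h : kbRows.getD c 0 = kbRows.getD prev 0
      · rw [if_pos h.symm, if_pos h]; ring
      · rw [if_neg (fun hh => h hh.symm), if_neg h]; ring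

theorem pre_nonempty (words : String) (h : words.toList ≠ []) : (PySem.Str.upper words).toList ≠ [] := by
  intro hc
  apply h
  rw [PySem.Str.toList_upper] at hc
  simpa [PySem.Chars.upper] using hc

theorem solution_eq (p w : Int) (words : String) (h : (PySem.Str.upper words).toList ≠ []) :
    solution p w words = solution_alt p w words := by
  obtain ⟨c, t, hct⟩ := List.exists_cons_of_ne_nil h
  unfold solution solution_alt
  rw [hct]
  simp only [kbA_fst, kbA_snd, Bool.false_eq_true, if_false,
    PySem.List.slice_from _ (by norm_num : (0 : Int) ≤ 1), Int.toNat_one,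
    List.drop_one, List.tail_cons, PySem.List.pyGetD_zero_cons]
  have hlen : ((c :: t).length : Int) = (t.length : Int) + 1 := by simp
  rw [hlen, shift_fold t.length]
  have hcg : ∀ (a : Int), ∀ k ∈ PySem.List.pyRange 0 (t.length : Int) 1,
      (if kbRows.getD (PySem.List.pyGetD (c :: t) (k + 1) ' ') 0
          == kbRows.getD (PySem.List.pyGetD (c :: t) (k + 1 - 1) ' ') 0 then
        a + w + p * kbCost.getD (PySem.List.pyGetD (c :: t) (k + 1) ' ') 0
      else a + p * kbCost.getD (PySem.List.pyGetD (c :: t) (k + 1) ' ') 0)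
      = (if kbRows.getD (PySem.List.pyGetD (c :: t) (k + 1) ' ') 0
          == kbRows.getD (PySem.List.pyGetD (c :: t) k ' ') 0 then
        a + w + p * kbCost.getD (PySem.List.pyGetD (c :: t) (k + 1) ' ') 0
      else a + p * kbCost.getD (PySem.List.pyGetD (c :: t) (k + 1) ' ') 0) := by
    intro a k _
    rw [show k + 1 - 1 = k from by ring]
  rw [PySem.List.foldl_congr_mem _ _ _ _ hcg, A_loop p w t c, ← B_sum p w t c]
  simp only [List.map_cons, List.sum_cons]
  ring

-- ===== VERDICT (by name: the statement is the Claim_ definition above) =====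
theorem solution_spec : Claim_equal_solution := by
  intro p w words _ hpre
  unfold Spec_solution
  exact solution_eq p w words (pre_nonempty words hpre.1)
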